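-- pv_equiv track=rewrite | github.com/ycpNotFound/GeoGen | verifier.py | check_paras
-- ===== SOURCE A (Python) =====
-- import itertools
--
-- def rotate_combinations(lst):
--     n = len(lst)
--     for i in range(n):
--         rotated = lst[i:] + lst[:i]
--         yield rotated
--
-- def check_paras(name, para, items):
--     if type(para) != tuple:
--         para = tuple(para)
--     if name in ['Line', 'Shape', 'Polygon', 'Collinear', 'Triangle']:
--         # No location restriction
--         para_permutations = list(itertools.permutations(para))
--         if any([para_i in items for para_i in para_permutations]):
--             return True
--     elif name in ['EquilateralTriangle', 'Parallelogram', 'Kite', 'Rhombus', 'Rectangle', 'Square', 'Trapezoid', 'IsoscelesTrapezoid']: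
--         # Can be rotation
--         para_rotations = rotate_combinations(para)
--         if any([para_i in items for para_i in para_rotations]):
--             return True
--     else:
--         # Other cases
--         if para in items:
--             return True
--
--     return False
-- ===== SOURCE B (Python) =====
-- PERM_NAMES = ('Line', 'Shape', 'Polygon', 'Collinear', 'Triangle')
-- ROT_NAMES = ('EquilateralTriangle', 'Parallelogram', 'Kite', 'Rhombus',
--              'Rectangle', 'Square', 'Trapezoid', 'IsoscelesTrapezoid')
--
--
-- def _same_multiset(x, y):
--     return all(x.count(c) == y.count(c) for c in x + y)
--
--
-- def check_paras(name, para, items):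
--     para = list(para)
--     if name in PERM_NAMES:
--         # some permutation of para is in items  <=>  some item has the same multiset
--         return any(_same_multiset(list(x), para) for x in items)
--     if name in ROT_NAMES:
--         # some rotation of para is in items: compare each item against windows of para+para
--         n = len(para)
--         doubled = para + para
--         return any(any(doubled[i:i + n] == list(x) for i in range(n)) for x in items)
--     return any(list(x) == para for x in items)
-- ===== Notes on version B (the rewrite author's own statement) =====
-- stated objective: alternative
-- what changed: B scans items once and tests count-based multiset equality (permutation names) or window equality against para+para (rotation names) instead of materialising all n! permutations (resp. the n rotations) of para and testing membership of each.
import Mathlib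
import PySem

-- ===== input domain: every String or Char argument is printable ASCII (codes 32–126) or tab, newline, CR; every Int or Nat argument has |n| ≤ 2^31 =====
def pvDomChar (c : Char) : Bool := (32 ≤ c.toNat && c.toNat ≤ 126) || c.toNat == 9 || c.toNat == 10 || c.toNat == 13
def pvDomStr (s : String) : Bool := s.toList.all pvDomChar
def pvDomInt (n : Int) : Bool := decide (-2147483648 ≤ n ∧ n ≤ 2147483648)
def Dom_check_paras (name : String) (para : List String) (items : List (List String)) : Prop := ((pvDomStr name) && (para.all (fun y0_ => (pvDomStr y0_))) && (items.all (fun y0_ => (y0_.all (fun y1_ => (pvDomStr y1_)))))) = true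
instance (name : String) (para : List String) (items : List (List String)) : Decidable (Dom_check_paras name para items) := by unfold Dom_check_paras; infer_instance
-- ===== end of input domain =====

-- B scans items once, testing count-based multiset equality (permutation names) / window
-- equality against para ++ para (rotation names), instead of A's enumeration of all
-- permutations (resp. rotations) of para with a membership test for each.

-- ===== PORT A =====
-- the two name lists (inline literals in the Python)
def permNameList : List String := ["Line", "Shape", "Polygon", "Collinear", "Triangle"]
def rotNameList : List String := ["EquilateralTriangle", "Parallelogram", "Kite", "Rhombus",
                                  "Rectangle", "Square", "Trapezoid", "IsoscelesTrapezoid"]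

-- rotate_combinations: rotated = lst[i:] + lst[:i] for i in range(len(lst))
def rotate_combinations (lst : List String) : List (List String) :=
  (List.range lst.length).map (fun (i : Nat) =>
    PySem.List.slice lst (some (i : Int)) none ++ PySem.List.slice lst none (some (i : Int)))

-- 'para = tuple(para)' is identity under the type convention (para and the elements of items
-- are both List String here; in the Python both sides of each membership test are tuples)
def check_paras (name : String) (para : List String) (items : List (List String)) : Bool :=
  if permNameList.contains name then
    let para_permutations := PySem.List.permutations para para.length
    if para_permutations.any (fun para_i => items.contains para_i) then true
    else false
  else if rotNameList.contains name then
    let para_rotations := rotate_combinations para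
    if para_rotations.any (fun para_i => items.contains para_i) then true
    else false
  else
    if items.contains para then true
    else false

-- ===== PORT B =====
def same_multiset (x y : List String) : Bool :=
  (x ++ y).all (fun c => PySem.List.count x c == PySem.List.count y c)

def check_paras_alt (name : String) (para : List String) (items : List (List String)) : Bool :=
  if permNameList.contains name then
    items.any (fun x => same_multiset x para)
  else if rotNameList.contains name then
    let n := para.length
    let doubled := para ++ para
    items.any (fun x => (List.range n).any (fun (i : Nat) =>
      PySem.List.slice doubled (some (i : Int)) (some ((i : Int) + (n : Int))) == x))
  else
    items.any (fun x => x == para)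

-- ===== PRECONDITION & SPEC =====
def Spec_check_paras (name : String) (para : List String) (items : List (List String)) (out : Bool) : Prop := out = check_paras_alt name para items
instance (name : String) (para : List String) (items : List (List String)) (out : Bool) : Decidable (Spec_check_paras name para items out) := by unfold Spec_check_paras; infer_instance

-- ===== CLAIM (what is proved, stated in full; the proofs are below) =====
def Claim_equal_check_paras : Prop := ∀ (name : String) (para : List String) (items : List (List String)), Dom_check_paras name para items → Spec_check_paras name para items (check_paras name para items)

-- ===== LEMMAS AND PROOFS =====

theorem same_multiset_iff (x y : List String) :
    same_multiset x y = true ↔ List.Perm x y := by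
  simp only [same_multiset, List.all_eq_true, PySem.List.count_eq, beq_iff_eq, List.mem_append]
  rw [List.perm_iff_count]
  constructor
  · intro h a
    by_cases ha : a ∈ x ∨ a ∈ y
    · exact h a ha
    · push Not at ha
      rw [List.count_eq_zero.mpr ha.1, List.count_eq_zero.mpr ha.2]
  · intro h a _
    exact h a

-- completeness of itertools-style permutations: every reordering of xs is generated
theorem mem_permutations_of_perm {x xs : List String} (h : List.Perm x xs) :
    x ∈ PySem.List.permutations xs xs.length := by
  induction x generalizing xs with
  | nil =>
    rw [h.symm.eq_nil]
    show ([] : List String) ∈ PySem.List.permutations [] 0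
    rw [PySem.List.permutations_zero]
    exact List.mem_singleton.mpr rfl
  | cons a x ih =>
    have ha : a ∈ xs := h.subset List.mem_cons_self
    have hi : xs.idxOf a < xs.length := List.idxOf_lt_length_of_mem ha
    have hget : xs[xs.idxOf a] = a := List.getElem_idxOf hi
    have hx : List.Perm x (xs.erase a) := (List.cons_perm_iff_perm_erase.mp h).2
    have hlen : (xs.erase a).length = xs.length - 1 := List.length_erase_of_mem ha
    obtain ⟨m, hm⟩ : ∃ m, xs.length = m + 1 := ⟨xs.length - 1, by omega⟩
    rw [hm, PySem.List.permutations_succ, List.mem_flatMap]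
    refine ⟨xs.idxOf a, List.mem_range.mpr hi, ?_⟩
    rw [List.getElem?_eq_getElem hi, hget]
    simp only [List.mem_map]
    refine ⟨x, ?_, rfl⟩
    rw [List.eraseIdx_idxOf_eq_erase]
    have h' := ih hx
    rwa [show (xs.erase a).length = m by omega] at h'

theorem window_eq_rotate (para : List String) (i : Nat) (h : i < para.length) :
    PySem.List.slice (para ++ para) (some (i : Int)) (some ((i : Int) + (para.length : Int))) =
      para.rotate i := by
  rw [PySem.List.slice_natCast_add (para ++ para) i para.length,
      List.rotate_eq_drop_append_take (le_of_lt h),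
      List.drop_append_of_le_length (le_of_lt h),
      List.take_append]
  congr 1
  · exact List.take_of_length_le (by simp)
  · congr 1
    simp
    omega

-- ===== VERDICT (by name: the statement is the Claim_ definition above) =====
theorem ite_true_false (c : Bool) : (if c = true then true else false) = c := by
  cases c <;> simp

theorem check_paras_spec : Claim_equal_check_paras := by
  intro name para items _
  unfold Spec_check_paras check_paras check_paras_alt
  split_ifs with h1 h2 h3
  · rw [ite_true_false, Bool.eq_iff_iff]
    simp only [List.any_eq_true, List.contains_iff_mem]
    constructor
    · rintro ⟨p, hp, hmem⟩
      exact ⟨p, hmem, (same_multiset_iff p para).mpr (PySem.List.perm_of_mem_permutations hp)⟩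
    · rintro ⟨x, hx, hsm⟩
      exact ⟨x, mem_permutations_of_perm ((same_multiset_iff x para).mp hsm), hx⟩
  · rw [ite_true_false, Bool.eq_iff_iff]
    unfold rotate_combinations
    constructor
    · intro hA
      obtain ⟨r, hr, hmem⟩ := List.any_eq_true.mp hA
      obtain ⟨i, hi, rfl⟩ := List.mem_map.mp hr
      have hi' := List.mem_range.mp hi
      refine List.any_eq_true.mpr ⟨_, by simpa using hmem, List.any_eq_true.mpr ⟨i, hi, ?_⟩⟩
      simp only [beq_iff_eq, window_eq_rotate para i hi',
        List.rotate_eq_drop_append_take (le_of_lt hi')]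
    · intro hB
      obtain ⟨x, hx, hin⟩ := List.any_eq_true.mp hB
      obtain ⟨i, hi, hsl⟩ := List.any_eq_true.mp hin
      have hi' := List.mem_range.mp hi
      have hxeq : para.rotate i = x := by
        rw [← window_eq_rotate para i hi']
        exact beq_iff_eq.mp hsl
      refine List.any_eq_true.mpr ⟨_, List.mem_map.mpr ⟨i, hi, rfl⟩, ?_⟩
      simp only [List.contains_iff_mem]
      simp only [PySem.List.slice_from_natCast, PySem.List.slice_to_natCast]
      rw [← List.rotate_eq_drop_append_take (le_of_lt hi'), hxeq]
      exact hx
  · symm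
    rw [List.any_eq_true]
    exact ⟨para, by simpa using h3, by simp⟩
  · symm
    rw [List.any_eq_false]
    intro x hx
    simp only [beq_iff_eq]
    rintro rfl
    exact h3 (by simpa using hx)
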